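-- pv_equiv track=rewrite | github.com/tobardaniel/Entrega | Olimpliada 2017/Olimpiada/venv/problema4.py | f_dinero
-- ===== SOURCE A (Python) =====
-- def f_dinero(rides, cupo, grupos):
--     n = len(grupos)
--     gente = sum(grupos)
--     dinero = 0
--     if gente <= cupo:
--         dinero = gente * rides
--     else:
--         patron = True
--         vueltas = 0
--         i = 0
--         while vueltas < rides and patron:
--             ocupados = 0
--             for x in range(n):
--                 if ocupados + grupos[i % n] <= cupo:
--                     ocupados = ocupados + grupos[i % n]
--                     i = i + 1
--                 else:
--                     break
--             dinero += ocupados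
--             vueltas += 1
--     return dinero
-- ===== SOURCE B (Python) =====
-- def f_dinero(rides, cupo, grupos):
--     n = len(grupos)
--     gente = sum(grupos)
--     if gente <= cupo:
--         return gente * rides
--     if rides <= 0 or n == 0:
--         return 0
--
--     def one_ride(s):
--         # greedy load of one ride starting at circular index s
--         oc = 0
--         j = s
--         for _ in range(n):
--             g = grupos[j % n]
--             if oc + g <= cupo:
--                 oc += g
--                 j += 1
--             else:
--                 break
--         return oc, j % n
--
--     # walk the start states from 0; a state repeats after at most n rides,
--     # then the remaining rides are whole cycles plus a partial prefix
--     seen = {}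
--     order = []
--     total = 0
--     s = 0
--     k = 0
--     while k < rides and s not in seen:
--         seen[s] = k
--         oc, nxt = one_ride(s)
--         order.append(oc)
--         total += oc
--         s = nxt
--         k += 1
--     if k == rides:
--         return total
--     mu = seen[s]
--     lam = k - mu
--     cyc = sum(order[mu:])
--     rem = rides - k
--     q, r = divmod(rem, lam)
--     return total + q * cyc + sum(order[mu:mu + r])
-- ===== Notes on version B (the rewrite author's own statement) =====
-- stated objective: alternative
-- what changed: Instead of A's round-by-round simulation over all rides, B simulates each distinct ride start state at most once, detects the first repeated start state, and closes the remaining rides arithmetically as whole cycles plus a partial cycle prefix.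
import Mathlib
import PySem

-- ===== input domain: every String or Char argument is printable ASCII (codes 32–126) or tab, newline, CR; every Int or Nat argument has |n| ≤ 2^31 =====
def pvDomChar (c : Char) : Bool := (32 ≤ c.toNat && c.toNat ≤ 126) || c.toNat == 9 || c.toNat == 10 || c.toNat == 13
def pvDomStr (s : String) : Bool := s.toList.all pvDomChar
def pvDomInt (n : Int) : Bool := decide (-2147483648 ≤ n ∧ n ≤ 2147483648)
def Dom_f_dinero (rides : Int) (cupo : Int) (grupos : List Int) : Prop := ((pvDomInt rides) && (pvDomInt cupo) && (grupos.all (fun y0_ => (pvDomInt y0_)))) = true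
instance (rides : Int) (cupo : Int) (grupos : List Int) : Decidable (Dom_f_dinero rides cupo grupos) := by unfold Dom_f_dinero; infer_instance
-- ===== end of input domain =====

-- B replaces A's full round-by-round simulation by cycle detection over the ride start states
-- (at most min(rides, n)+1 rounds are simulated; the remaining rides are closed by cycle-sum arithmetic).


-- ===== PORT A =====
-- inner 'for x in range(n)' loop of A; the index i % n is always in range when the loop body
-- runs (it only runs with fuel = n > 0 and 0 ≤ i), so the .getD 0 default is never used
def pvForA (cupo : Int) (grupos : List Int) (n : Nat) : Nat → Int → Int → Int × Int
  | 0, oc, i => (oc, i)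
  | x + 1, oc, i =>
      let g := (PySem.List.pyGet? grupos (PySem.Int.mod i (n : Int))).getD 0
      if oc + g ≤ cupo then pvForA cupo grupos n x (oc + g) (i + 1)
      else (oc, i)

-- 'while vueltas < rides' loop of A ('patron' is never set to False): runs rides.toNat times
def pvWhileA (cupo : Int) (grupos : List Int) (n : Nat) : Nat → Int → Int → Int
  | 0, dinero, _ => dinero
  | v + 1, dinero, i =>
      let r := pvForA cupo grupos n n 0 i
      pvWhileA cupo grupos n v (dinero + r.1) r.2

def f_dinero (rides : Int) (cupo : Int) (grupos : List Int) : Int :=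
  let n := grupos.length
  let gente := grupos.sum
  if gente ≤ cupo then gente * rides
  else pvWhileA cupo grupos n rides.toNat 0 0

-- ===== PORT B =====
-- B's per-start greedy loading loop (start index j is a Nat; j % n is always in range, n > 0)
def pvForB (cupo : Int) (grupos : List Int) (n : Nat) : Nat → Int → Nat → Int × Nat
  | 0, oc, j => (oc, j)
  | x + 1, oc, j =>
      let g := (PySem.List.pyGet? grupos ((j % n : Nat) : Int)).getD 0
      if oc + g ≤ cupo then pvForB cupo grupos n x (oc + g) (j + 1)
      else (oc, j)

-- B's state walk: fuel = rides - k remaining rounds; each visited start state s gets its round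
-- simulated once (one_ride = pvForB); on the first repeated state the remaining rem = rides - k
-- rounds are closed as q full cycles plus r leading rounds of the cycle
def pvWalkB (rides cupo : Int) (grupos : List Int) (n : Nat) :
    Nat → PySem.Dict Nat Nat → List Int → Int → Nat → Nat → Int
  | 0, _, _, total, _, _ => total
  | fuel + 1, seen, order, total, s, k =>
      match seen.get? s with
      | some mu =>
          let lam := k - mu
          let cyc := (order.drop mu).sum
          let rem := rides - (k : Int)
          let q := PySem.Int.floordiv rem (lam : Int)
          let r := PySem.Int.mod rem (lam : Int)
          total + q * cyc + ((order.drop mu).take r.toNat).sum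
      | none =>
          let oc := (pvForB cupo grupos n n 0 s).1
          let nxt := (pvForB cupo grupos n n 0 s).2 % n
          pvWalkB rides cupo grupos n fuel (seen.insert s k) (order ++ [oc])
            (total + oc) nxt (k + 1)

def f_dinero_alt (rides : Int) (cupo : Int) (grupos : List Int) : Int :=
  let n := grupos.length
  let gente := grupos.sum
  if gente ≤ cupo then gente * rides
  else if rides ≤ 0 ∨ n = 0 then 0
  else pvWalkB rides cupo grupos n rides.toNat PySem.Dict.empty [] 0 0 0

-- ===== PRECONDITION & SPEC =====
def Spec_f_dinero (rides : Int) (cupo : Int) (grupos : List Int) (out : Int) : Prop := out = f_dinero_alt rides cupo grupos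
instance (rides : Int) (cupo : Int) (grupos : List Int) (out : Int) : Decidable (Spec_f_dinero rides cupo grupos out) := by unfold Spec_f_dinero; infer_instance

-- ===== CLAIM (what is proved, stated in full; the proofs are below) =====
def Claim_equal_f_dinero : Prop := ∀ (rides : Int) (cupo : Int) (grupos : List Int), Dom_f_dinero rides cupo grupos → Spec_f_dinero rides cupo grupos (f_dinero rides cupo grupos)

-- ===== LEMMAS AND PROOFS =====

def pvL (cupo : Int) (g : List Int) (n : Nat) (s : Nat) : Int := (pvForB cupo g n n 0 s).1
def pvF (cupo : Int) (g : List Int) (n : Nat) (s : Nat) : Nat := (pvForB cupo g n n 0 s).2 % n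
def pvS (cupo : Int) (g : List Int) (n : Nat) : Nat → Nat → Int
  | 0, _ => 0
  | k + 1, s => pvL cupo g n s + pvS cupo g n k (pvF cupo g n s)

theorem pvS_succ_right (cupo : Int) (g : List Int) (n : Nat) :
    ∀ (k : Nat) (s : Nat), pvS cupo g n (k + 1) s
      = pvS cupo g n k s + pvL cupo g n ((pvF cupo g n)^[k] s) := by
  intro k
  induction k with
  | zero => intro s; simp [pvS]
  | succ k ih =>
    intro s
    have h1 : pvS cupo g n (k + 1 + 1) s = pvL cupo g n s + pvS cupo g n (k + 1) (pvF cupo g n s) := rfl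
    rw [h1, ih, Function.iterate_succ_apply, pvS]
    ring

theorem pvS_add (cupo : Int) (g : List Int) (n : Nat) :
    ∀ (a b : Nat) (s : Nat), pvS cupo g n (a + b) s
      = pvS cupo g n a s + pvS cupo g n b ((pvF cupo g n)^[a] s) := by
  intro a
  induction a with
  | zero => intro b s; simp [pvS]
  | succ a ih =>
    intro b s
    have h0 : a + 1 + b = (a + b) + 1 := by omega
    rw [h0, pvS, ih, Function.iterate_succ_apply, pvS]
    ring

theorem pvS_eq_sum_range (cupo : Int) (g : List Int) (n : Nat) :
    ∀ (m : Nat) (s : Nat), pvS cupo g n m s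
      = ((List.range m).map (fun t => pvL cupo g n ((pvF cupo g n)^[t] s))).sum := by
  intro m
  induction m with
  | zero => intro s; simp [pvS]
  | succ m ih =>
    intro s
    rw [pvS_succ_right, ih, List.range_succ]
    simp

theorem pvS_cycle (cupo : Int) (g : List Int) (n : Nat) (lam : Nat) (p : Nat)
    (hfix : (pvF cupo g n)^[lam] p = p) :
    ∀ (q : Nat), pvS cupo g n (q * lam) p = (q : Int) * pvS cupo g n lam p := by
  intro q
  induction q with
  | zero => simp [pvS]
  | succ q ih =>
    have hq : (q + 1) * lam = q * lam + lam := by ring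
    rw [hq, pvS_add, ih]
    have hfx : (pvF cupo g n)^[q * lam] p = p := by
      rw [show q * lam = lam * q by ring, Function.iterate_mul]
      exact Function.iterate_fixed hfix q
    rw [hfx]
    push_cast
    ring
theorem pvForA_eq_pvForB (cupo : Int) (g : List Int) (n : Nat) :
    ∀ (fuel : Nat) (oc : Int) (i : Int) (j : Nat), 0 ≤ i → i.toNat % n = j % n →
      (pvForA cupo g n fuel oc i).1 = (pvForB cupo g n fuel oc j).1 ∧
      0 ≤ (pvForA cupo g n fuel oc i).2 ∧
      (pvForA cupo g n fuel oc i).2.toNat % n = (pvForB cupo g n fuel oc j).2 % n := by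
  intro fuel
  induction fuel with
  | zero => intro oc i j hi hij; exact ⟨rfl, hi, hij⟩
  | succ f ih =>
    intro oc i j hi hij
    have hmod : PySem.Int.mod i (n : Int) = ((j % n : Nat) : Int) := by
      rw [show i = ((i.toNat : Nat) : Int) by omega, PySem.Int.mod_natCast, hij]
    simp only [pvForA, pvForB, hmod]
    split
    · refine ih (oc + (PySem.List.pyGet? g ((j % n : Nat) : Int)).getD 0) (i + 1) (j + 1) (by omega) ?_
      have h1 : (i + 1).toNat = i.toNat + 1 := by omega
      rw [h1, Nat.add_mod, hij, ← Nat.add_mod]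
    · exact ⟨rfl, hi, hij⟩
theorem pvWhileA_zero (cupo : Int) (g : List Int) :
    ∀ (R : Nat) (d : Int) (i : Int), pvWhileA cupo g 0 R d i = d := by
  intro R
  induction R with
  | zero => intro d i; rfl
  | succ R ih =>
    intro d i
    show pvWhileA cupo g 0 R (d + (pvForA cupo g 0 0 0 i).1) (pvForA cupo g 0 0 0 i).2 = d
    simpa [pvForA] using ih (d + 0) i

theorem pvWhileA_eq_pvS (cupo : Int) (g : List Int) (n : Nat) :
    ∀ (R : Nat) (d : Int) (i : Int), 0 ≤ i →
      pvWhileA cupo g n R d i = d + pvS cupo g n R (i.toNat % n) := by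
  intro R
  induction R with
  | zero => intro d i hi; simp [pvWhileA, pvS]
  | succ R ih =>
    intro d i hi
    have hb := pvForA_eq_pvForB cupo g n n 0 i (i.toNat % n) hi (by rw [Nat.mod_mod_of_dvd _ dvd_rfl])
    show pvWhileA cupo g n R (d + (pvForA cupo g n n 0 i).1) (pvForA cupo g n n 0 i).2 = _
    rw [ih (d + (pvForA cupo g n n 0 i).1) (pvForA cupo g n n 0 i).2 hb.2.1,
      hb.2.2, hb.1]
    show d + pvL cupo g n (i.toNat % n) + pvS cupo g n R (pvF cupo g n (i.toNat % n))
      = d + pvS cupo g n (R + 1) (i.toNat % n)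
    rw [pvS]
    ring
theorem pvWalkB_eq_pvS (rides cupo : Int) (g : List Int) (n : Nat) :
    ∀ (fuel : Nat) (seen : PySem.Dict Nat Nat) (order : List Int) (total : Int) (s k : Nat),
      fuel + k = rides.toNat →
      s = (pvF cupo g n)^[k] 0 →
      total = pvS cupo g n k 0 →
      order = (List.range k).map (fun t => pvL cupo g n ((pvF cupo g n)^[t] 0)) →
      (∀ x m, seen.get? x = some m → m < k ∧ (pvF cupo g n)^[m] 0 = x) →
      pvWalkB rides cupo g n fuel seen order total s k = pvS cupo g n rides.toNat 0 := by
  intro fuel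
  induction fuel with
  | zero =>
    intro seen order total s k hfk hs ht ho hseen
    have hk : k = rides.toNat := by omega
    rw [pvWalkB, ht, hk]
  | succ f ih =>
    intro seen order total s k hfk hs ht ho hseen
    rw [pvWalkB]
    cases h : seen.get? s with
    | none =>
      simp only
      refine ih (seen.insert s k) _ _ _ (k + 1) (by omega) ?_ ?_ ?_ ?_
      · rw [Function.iterate_succ_apply', ← hs]
        rfl
      · rw [ht, pvS_succ_right, hs]
        rfl
      · rw [ho, List.range_succ, List.map_append, List.map_cons, List.map_nil, hs]
        rfl
      · intro x m hm
        rw [PySem.Dict.get?_insert] at hm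
        split at hm
        · rename_i hx
          obtain rfl : k = m := by injection hm
          exact ⟨Nat.lt_succ_self k, by rw [← hs, hx]⟩
        · obtain ⟨h1, h2⟩ := hseen x m hm
          exact ⟨by omega, h2⟩
    | some mu =>
      simp only
      obtain ⟨hmu, hFmu⟩ := hseen s mu h
      set F := pvF cupo g n with hF
      set lam := k - mu with hlam
      have hlam1 : 1 ≤ lam := by omega
      have hfix : F^[lam] ((F)^[mu] 0) = F^[mu] 0 := by
        rw [← Function.iterate_add_apply, show lam + mu = k by omega, ← hs, hFmu]
      set p := F^[mu] 0 with hp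
      have hps : p = s := hFmu
      -- integer division facts
      have hkR : k + 1 ≤ rides.toNat := by omega
      have hrempos : (0:Int) < rides - (k:Int) := by omega
      set rem : Int := rides - (k:Int) with hremdef
      have hlamZ : (0:Int) < (lam:Int) := by exact_mod_cast hlam1
      have hdm := Int.mul_ediv_add_emod rem (lam:Int)
      have hq0 : 0 ≤ rem / (lam:Int) := Int.ediv_nonneg (by omega) (by omega)
      have hr0 : 0 ≤ rem % (lam:Int) := Int.emod_nonneg rem (by omega)
      have hrlt : rem % (lam:Int) < (lam:Int) := Int.emod_lt_of_pos rem hlamZ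
      set qn : Nat := (rem / (lam:Int)).toNat with hqn
      set rn : Nat := (rem % (lam:Int)).toNat with hrn
      have hqcast : ((qn:Int)) = rem / (lam:Int) := Int.toNat_of_nonneg hq0
      have hrcast : ((rn:Int)) = rem % (lam:Int) := Int.toNat_of_nonneg hr0
      have hrnlam : rn < lam := by omega
      have hRdecomp : rides.toNat = k + (qn * lam + rn) := by
        have : (qn:Int) * (lam:Int) + (rn:Int) = rem := by rw [hqcast, hrcast, mul_comm]; omega
        have h2 : ((qn * lam + rn : Nat) : Int) = rem := by push_cast; omega
        omega
      -- order segment facts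
      have hshift : ∀ t, pvL cupo g n (F^[mu + t] 0) = pvL cupo g n (F^[t] p) := by
        intro t; rw [Nat.add_comm, Function.iterate_add_apply]
      have hdrop : order.drop mu = (List.range lam).map (fun t => pvL cupo g n (F^[t] p)) := by
        rw [ho, show k = mu + lam by omega, List.range_add, List.map_append,
          List.drop_left' (by simp), List.map_map]
        simp only [Function.comp_def, hshift]
      have hcyc : (order.drop mu).sum = pvS cupo g n lam p := by
        rw [hdrop, ← pvS_eq_sum_range]
      have htake : ((order.drop mu).take rn).sum = pvS cupo g n rn p := by
        rw [hdrop, ← List.map_take, List.take_range, Nat.min_eq_left (le_of_lt hrnlam),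
          ← pvS_eq_sum_range]
      have hfixq : F^[qn * lam] p = p := by
        rw [show qn * lam = lam * qn by ring, Function.iterate_mul]
        exact Function.iterate_fixed hfix qn
      have hsplit : pvS cupo g n rides.toNat 0
          = pvS cupo g n k 0 + (qn:Int) * pvS cupo g n lam p + pvS cupo g n rn p := by
        rw [hRdecomp, pvS_add, pvS_add, ← hs, ← hps, pvS_cycle cupo g n lam p hfix qn, hfixq]
        ring
      rw [PySem.Int.floordiv_eq_ediv_of_pos hlamZ, PySem.Int.mod_eq_emod_of_pos hlamZ]
      rw [← hremdef] at *
      rw [hcyc, ← hrn, htake, hsplit, ht, ← hqcast]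

-- ===== VERDICT (by name: the statement is the Claim_ definition above) =====
theorem f_dinero_spec : Claim_equal_f_dinero := by
  intro rides cupo grupos _
  unfold Spec_f_dinero f_dinero f_dinero_alt
  by_cases hg : grupos.sum ≤ cupo
  · simp [hg]
  · simp only [hg, if_false]
    by_cases hn : grupos.length = 0
    · simp [hn, pvWhileA_zero]
    · have hn' : 0 < grupos.length := Nat.pos_of_ne_zero hn
      by_cases hr : rides ≤ 0
      · have h0 : rides.toNat = 0 := by omega
        simp [hr, h0, pvWhileA]
      · rw [if_neg (by simp [hr, hn])]
        rw [pvWhileA_eq_pvS cupo grupos _ rides.toNat 0 0 le_rfl]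
        rw [pvWalkB_eq_pvS rides cupo grupos _ rides.toNat PySem.Dict.empty [] 0 0 0
          (by omega) (by simp) (by simp [pvS]) (by simp)
          (by intro x m hm; simp [PySem.Dict.get?_empty] at hm)]
        simp
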